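-- pv_equiv track=rewrite | github.com/sga-jerrylin/S-Matrix | doris-api/planner_agent.py | _select_fallback_table
-- ===== SOURCE A (Python) =====
-- from typing import Any, Dict, List, Optional, Sequence, Tuple
--
-- def _select_fallback_table(available_tables: Sequence[str], all_tables_ordered: Sequence[str]) -> str:
--     preferred = [
--         "orders",
--         "member",
--         "order_payment_trade",
--         "order_items",
--         "inventory_realtime",
--         "warehouse_stock_in_items",
--         "warehouse_stock_out_items",
--     ]
--     available = set(available_tables)
--     for table_name in preferred:
--         if table_name in available:
--             return table_name
--     for table_name in all_tables_ordered:
--         if table_name: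
--             return table_name
--     return ""
-- ===== SOURCE B (Python) =====
-- def _select_fallback_table(available_tables, all_tables_ordered):
--     rank = {name: i for i, name in enumerate([
--         "orders",
--         "member",
--         "order_payment_trade",
--         "order_items",
--         "inventory_realtime",
--         "warehouse_stock_in_items",
--         "warehouse_stock_out_items",
--     ])}
--     best = None  # (rank, name) of the best-priority available table seen so far
--     for t in available_tables:
--         r = rank.get(t)
--         if r is not None and (best is None or r < best[0]):
--             best = (r, t)
--     if best is not None:
--         return best[1]
--     return next((t for t in all_tables_ordered if t), "")
-- ===== Notes on version B (the rewrite author's own statement) =====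
-- stated objective: alternative
-- what changed: B inverts the scan: instead of walking the fixed preferred list and testing membership in a set of available tables, it builds a name-to-priority dict once and makes a single pass over available_tables keeping the minimum-rank hit; the fallback becomes a next() over a generator.
import Mathlib
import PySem

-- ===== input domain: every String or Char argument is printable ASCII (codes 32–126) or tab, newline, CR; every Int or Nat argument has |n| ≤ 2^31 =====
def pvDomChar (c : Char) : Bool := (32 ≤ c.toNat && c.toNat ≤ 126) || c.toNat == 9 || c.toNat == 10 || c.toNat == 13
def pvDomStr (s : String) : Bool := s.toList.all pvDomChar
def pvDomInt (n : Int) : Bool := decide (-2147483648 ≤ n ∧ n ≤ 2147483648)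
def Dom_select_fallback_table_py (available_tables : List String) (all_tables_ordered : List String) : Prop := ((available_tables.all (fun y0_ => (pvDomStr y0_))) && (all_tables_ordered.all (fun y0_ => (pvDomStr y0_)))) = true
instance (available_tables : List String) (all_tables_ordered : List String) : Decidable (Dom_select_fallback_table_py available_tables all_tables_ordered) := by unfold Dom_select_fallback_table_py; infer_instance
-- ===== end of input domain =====

-- B inverts A's scan: instead of walking the fixed preferred list against a set of available
-- tables, it makes one pass over available_tables keeping the minimum-priority hit of a
-- name→rank dict (alternative decomposition; no speed claim).

-- ===== PORT A =====
-- A's fixed 'preferred' list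
def pvPreferred : List String :=
  ["orders", "member", "order_payment_trade", "order_items",
   "inventory_realtime", "warehouse_stock_in_items", "warehouse_stock_out_items"]

-- 'for table_name in preferred: if table_name in available: return table_name'
def pvLoopPreferred (avail : PySem.Set String) : List String → Option String
  | [] => none
  | t :: rest => if PySem.Set.contains avail t then some t else pvLoopPreferred avail rest

-- 'for table_name in all_tables_ordered: if table_name: return table_name' then 'return ""'
def pvLoopFallback : List String → String
  | [] => ""
  | t :: rest => if t ≠ "" then t else pvLoopFallback rest

def select_fallback_table_py (available_tables : List String) (all_tables_ordered : List String) : String :=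
  match pvLoopPreferred (PySem.Set.ofList available_tables) pvPreferred with
  | some t => t
  | none => pvLoopFallback all_tables_ordered

-- ===== PORT B =====
-- Source B's rank dict {name: i} (the dict comprehension over enumerate, written out)
def pvRank : PySem.Dict String Int :=
  PySem.Dict.ofList
    [("orders", 0), ("member", 1), ("order_payment_trade", 2), ("order_items", 3),
     ("inventory_realtime", 4), ("warehouse_stock_in_items", 5), ("warehouse_stock_out_items", 6)]

-- one step of Source B's loop body: keep the minimum-rank (rank, name) pair seen so far
def pvBStep (best : Option (Int × String)) (t : String) : Option (Int × String) :=
  match PySem.Dict.get? pvRank t with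
  | none => best
  | some r =>
    match best with
    | none => some (r, t)
    | some p => if r < p.1 then some (r, t) else best

def pvBest (available_tables : List String) : Option (Int × String) :=
  available_tables.foldl pvBStep none

def select_fallback_table_py_alt (available_tables : List String) (all_tables_ordered : List String) : String :=
  match pvBest available_tables with
  | some p => p.2
  | none => ((all_tables_ordered.find? (fun t => !(t == ""))).getD "")

-- ===== PRECONDITION & SPEC =====
def Spec_select_fallback_table_py (available_tables : List String) (all_tables_ordered : List String) (out : String) : Prop := out = select_fallback_table_py_alt available_tables all_tables_ordered
instance (available_tables : List String) (all_tables_ordered : List String) (out : String) : Decidable (Spec_select_fallback_table_py available_tables all_tables_ordered out) := by unfold Spec_select_fallback_table_py; infer_instance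

-- ===== CLAIM (what is proved, stated in full; the proofs are below) =====
def Claim_equal_select_fallback_table_py : Prop := ∀ (available_tables : List String) (all_tables_ordered : List String), Dom_select_fallback_table_py available_tables all_tables_ordered → Spec_select_fallback_table_py available_tables all_tables_ordered (select_fallback_table_py available_tables all_tables_ordered)

-- ===== LEMMAS AND PROOFS =====

-- merge of two candidate (rank, name) results: the smaller rank wins, the left on ties
def pvMerge (b o : Option (Int × String)) : Option (Int × String) :=
  match o with
  | none => b
  | some q => match b with
    | none => some q
    | some p => if q.1 < p.1 then some q else some p

theorem pvBStep_merge (b : Option (Int × String)) (t : String) (o : Option (Int × String)) :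
    pvMerge (pvBStep b t) o = pvMerge b (pvMerge (pvBStep none t) o) := by
  unfold pvBStep pvMerge
  rcases PySem.Dict.get? pvRank t with _ | r <;>
    rcases b with _ | p <;> rcases o with _ | q <;> simp <;> split_ifs <;>
    simp_all <;> (try split_ifs) <;> first | rfl | omega

theorem foldl_pvBStep_merge (xs : List String) (b : Option (Int × String)) :
    xs.foldl pvBStep b = pvMerge b (xs.foldl pvBStep none) := by
  induction xs generalizing b with
  | nil => cases b <;> rfl
  | cons t xs ih =>
    simp only [List.foldl_cons]
    rw [ih (pvBStep b t), ih (pvBStep none t), pvBStep_merge]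

-- the if-chain over the seven memberships to which both programs reduce
def pvChain (av : List String) : Option (Int × String) :=
  if av.contains "orders" then some (0, "orders")
  else if av.contains "member" then some (1, "member")
  else if av.contains "order_payment_trade" then some (2, "order_payment_trade")
  else if av.contains "order_items" then some (3, "order_items")
  else if av.contains "inventory_realtime" then some (4, "inventory_realtime")
  else if av.contains "warehouse_stock_in_items" then some (5, "warehouse_stock_in_items")
  else if av.contains "warehouse_stock_out_items" then some (6, "warehouse_stock_out_items")
  else none

set_option maxHeartbeats 1000000 in
theorem pvStep_chain (t : String) (xs : List String) :
    pvMerge (pvBStep none t) (pvChain xs) = pvChain (t :: xs) := by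
  by_cases h0 : t = "orders"
  · subst h0
    rw [show pvBStep none "orders" = some (0, "orders") from by decide]
    simp only [pvChain, List.contains_cons]
    norm_num
    split_ifs <;> simp_all [pvMerge]
  by_cases h1 : t = "member"
  · subst h1
    rw [show pvBStep none "member" = some (1, "member") from by decide]
    simp only [pvChain, List.contains_cons]
    norm_num
    split_ifs <;> simp_all [pvMerge]
  by_cases h2 : t = "order_payment_trade"
  · subst h2
    rw [show pvBStep none "order_payment_trade" = some (2, "order_payment_trade") from by decide]
    simp only [pvChain, List.contains_cons]
    norm_num
    split_ifs <;> simp_all [pvMerge]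
  by_cases h3 : t = "order_items"
  · subst h3
    rw [show pvBStep none "order_items" = some (3, "order_items") from by decide]
    simp only [pvChain, List.contains_cons]
    norm_num
    split_ifs <;> simp_all [pvMerge]
  by_cases h4 : t = "inventory_realtime"
  · subst h4
    rw [show pvBStep none "inventory_realtime" = some (4, "inventory_realtime") from by decide]
    simp only [pvChain, List.contains_cons]
    norm_num
    split_ifs <;> simp_all [pvMerge]
  by_cases h5 : t = "warehouse_stock_in_items"
  · subst h5
    rw [show pvBStep none "warehouse_stock_in_items" = some (5, "warehouse_stock_in_items") from by decide]
    simp only [pvChain, List.contains_cons]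
    norm_num
    split_ifs <;> simp_all [pvMerge]
  by_cases h6 : t = "warehouse_stock_out_items"
  · subst h6
    rw [show pvBStep none "warehouse_stock_out_items" = some (6, "warehouse_stock_out_items") from by decide]
    simp only [pvChain, List.contains_cons]
    norm_num
    split_ifs <;> simp_all [pvMerge]
  have hr : pvRank.get? t = none := by
    rw [PySem.Dict.get?_eq_none_iff_not_mem_keys]
    simp [PySem.Dict.keys,
      show pvRank.items = [("orders", 0), ("member", 1), ("order_payment_trade", 2), ("order_items", 3),
        ("inventory_realtime", 4), ("warehouse_stock_in_items", 5), ("warehouse_stock_out_items", 6)] from rfl,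
      h0, h1, h2, h3, h4, h5, h6]
  rw [show pvBStep none t = none by simp [pvBStep, hr]]
  rw [show pvChain (t :: xs) = pvChain xs by
    simp only [pvChain, List.contains_cons,
      show ("orders" == t) = false by simpa using Ne.symm h0,
      show ("member" == t) = false by simpa using Ne.symm h1,
      show ("order_payment_trade" == t) = false by simpa using Ne.symm h2,
      show ("order_items" == t) = false by simpa using Ne.symm h3,
      show ("inventory_realtime" == t) = false by simpa using Ne.symm h4,
      show ("warehouse_stock_in_items" == t) = false by simpa using Ne.symm h5,
      show ("warehouse_stock_out_items" == t) = false by simpa using Ne.symm h6,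
      Bool.false_or]]
  cases pvChain xs <;> rfl

theorem pvBest_eq_chain (av : List String) : pvBest av = pvChain av := by
  induction av with
  | nil => rfl
  | cons t xs ih =>
    unfold pvBest at *
    simp only [List.foldl_cons]
    rw [foldl_pvBStep_merge, ih, pvStep_chain]

theorem set_contains_ofList (av : List String) (n : String) :
    PySem.Set.contains (PySem.Set.ofList av) n = av.contains n := by
  by_cases h : n ∈ av <;>
    simp [PySem.Set.mem_ofList, h]

theorem fallback_eq (l : List String) :
    pvLoopFallback l = ((l.find? (fun t => !(t == ""))).getD "") := by
  induction l with
  | nil => rfl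
  | cons t xs ih =>
    unfold pvLoopFallback
    by_cases h : t = "" <;> simp [h, ih]

-- ===== VERDICT (by name: the statement is the Claim_ definition above) =====
theorem select_fallback_table_py_spec : Claim_equal_select_fallback_table_py := by
  intro av al _
  unfold Spec_select_fallback_table_py select_fallback_table_py select_fallback_table_py_alt
  rw [pvBest_eq_chain, ← fallback_eq]
  simp only [pvLoopPreferred, pvPreferred, pvChain, set_contains_ofList]
  split_ifs <;> rfl
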